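-- pv_equiv track=rewrite | github.com/shreyatpandey/Coding-Challenges | Amazon/OA-Sample/Get-Maximimum-Stability-Server/Source-Greedy.py | getMaxStabilityGreedy
-- ===== SOURCE A (Python) =====
-- def getMaxStabilityGreedy(reliability, availability):
--     """
--     Calculates the maximum possible stability of any subset of servers
--     using a greedy approach.
--
--     Args:
--         reliability: List of integer reliability factors for each server.
--         availability: List of integer availability factors for each server.
--
--     Returns:
--         The maximum stability modulo (10^9 + 7).
--     """
--
--     n = len(reliability)
--     mod = 10**9 + 7
--
--     # Sort servers by availability in descending order
--     sorted_indices = sorted(range(n), key=lambda x: availability[x], reverse=True)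
--
--     # Calculate cumulative sum of reliabilities in sorted order
--     sorted_reliability = [reliability[i] for i in sorted_indices]
--     reliability_sum = [r for r in sorted_reliability]
--     for i in range(1, n):
--         reliability_sum[i] += reliability_sum[i - 1]
--
--     # Calculate maximum stability
--     max_stability = 0
--     for i in range(n):
--         stability = availability[sorted_indices[i]] * reliability_sum[i]
--         max_stability = max(max_stability, stability)
--
--     return max_stability % mod
-- ===== SOURCE B (Python) =====
-- def getMaxStabilityGreedy(reliability, availability):
--     """Direct evaluation without sorting: for each server i, the candidate subset is
--     every server ranked at least as high (greater availability, or equal availability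
--     and not after i); stability = availability[i] * sum of those reliabilities."""
--     n = len(reliability)
--     mod = 10**9 + 7
--     best = 0
--     for i in range(n):
--         a = availability[i]
--         s = 0
--         for j in range(n):
--             if availability[j] > a or (availability[j] == a and j <= i):
--                 s += reliability[j]
--         best = max(best, a * s)
--     return best % mod
-- ===== Notes on version B (the rewrite author's own statement) =====
-- stated objective: alternative
-- what changed: B drops the sort, the index array, the prefix-sum array and the separate max loop entirely: for each server i it directly sums the reliabilities of all servers ranked at least as high (greater availability, or equal availability and index <= i) in a nested scan and maximizes availability[i] times that sum.
import Mathlib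
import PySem

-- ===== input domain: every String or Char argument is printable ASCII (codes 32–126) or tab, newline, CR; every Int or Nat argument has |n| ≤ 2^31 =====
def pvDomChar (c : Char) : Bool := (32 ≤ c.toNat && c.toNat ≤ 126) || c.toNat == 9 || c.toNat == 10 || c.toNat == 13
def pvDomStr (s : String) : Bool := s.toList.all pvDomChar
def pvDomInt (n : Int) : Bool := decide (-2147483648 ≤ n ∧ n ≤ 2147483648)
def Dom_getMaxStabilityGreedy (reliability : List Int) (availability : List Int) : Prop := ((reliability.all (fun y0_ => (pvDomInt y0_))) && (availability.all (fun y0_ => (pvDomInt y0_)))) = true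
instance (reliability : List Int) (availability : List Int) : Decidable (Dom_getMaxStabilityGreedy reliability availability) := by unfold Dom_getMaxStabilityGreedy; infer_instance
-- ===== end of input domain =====

-- B drops the sort, the index array, the prefix-sum array and the separate max loop: for each
-- server i it directly sums, in a nested scan, the reliabilities of all servers ranked at least
-- as high, and maximizes availability[i] * that sum (objective: alternative algorithm).

-- ===== PORT A =====
def getMaxStabilityGreedy (reliability : List Int) (availability : List Int) : Int :=
  let n : Int := (reliability.length : Int)
  let md : Int := 10 ^ 9 + 7
  let sortedIndices := PySem.List.sorted (PySem.List.pyRange 0 n 1) (fun x => PySem.List.pyGetD availability x 0) true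
  let sortedReliability := sortedIndices.map (fun i => PySem.List.pyGetD reliability i 0)
  let reliabilitySum := (PySem.List.pyRange 1 n 1).foldl
    (fun rs i => PySem.List.pySetD rs i (PySem.List.pyGetD rs i 0 + PySem.List.pyGetD rs (i - 1) 0)) sortedReliability
  let maxStability := (PySem.List.pyRange 0 n 1).foldl
    (fun m i => max m (PySem.List.pyGetD availability (PySem.List.pyGetD sortedIndices i 0) 0 * PySem.List.pyGetD reliabilitySum i 0)) 0
  PySem.Int.mod maxStability md

-- ===== PORT B =====
def getMaxStabilityGreedy_alt (reliability : List Int) (availability : List Int) : Int :=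
  let n : Int := (reliability.length : Int)
  let md : Int := 10 ^ 9 + 7
  let best := (PySem.List.pyRange 0 n 1).foldl (fun best i =>
    let ai := PySem.List.pyGetD availability i 0
    let s := (PySem.List.pyRange 0 n 1).foldl (fun s j =>
      if PySem.List.pyGetD availability j 0 > ai ∨ (PySem.List.pyGetD availability j 0 = ai ∧ j ≤ i)
      then s + PySem.List.pyGetD reliability j 0 else s) 0
    max best (ai * s)) 0
  PySem.Int.mod best md

-- ===== PRECONDITION & SPEC =====
-- Pre_ excludes only inputs with fewer availability entries than reliability entries, on which
-- A raises IndexError (availability[x] inside the sort key); B raises IndexError there too.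
def Pre_getMaxStabilityGreedy (reliability : List Int) (availability : List Int) : Prop :=
  reliability.length ≤ availability.length
instance (reliability : List Int) (availability : List Int) : Decidable (Pre_getMaxStabilityGreedy reliability availability) := by unfold Pre_getMaxStabilityGreedy; infer_instance
def pvWitness_getMaxStabilityGreedy : List Int × List Int := ([2, 5, 3], [1, 2, 2])

def Spec_getMaxStabilityGreedy (reliability : List Int) (availability : List Int) (out : Int) : Prop := out = getMaxStabilityGreedy_alt reliability availability
instance (reliability : List Int) (availability : List Int) (out : Int) : Decidable (Spec_getMaxStabilityGreedy reliability availability out) := by unfold Spec_getMaxStabilityGreedy; infer_instance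

-- ===== CLAIM (what is proved, stated in full; the proofs are below) =====
def Claim_equal_getMaxStabilityGreedy : Prop := ∀ (reliability : List Int) (availability : List Int), Dom_getMaxStabilityGreedy reliability availability → Pre_getMaxStabilityGreedy reliability availability → Spec_getMaxStabilityGreedy reliability availability (getMaxStabilityGreedy reliability availability)

-- ===== LEMMAS AND PROOFS =====

-- the combined key: descending stable sort by availability = descending sort by K (injective on [0,n))
def pvK (a : List Int) (n x : Int) : Int := PySem.List.pyGetD a x 0 * n - x

theorem pv_K_lt_iff (a : List Int) (n x y : Int) (h0 : 0 ≤ y) (hyx : y < x) (hxn : x < n) :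
    (PySem.List.pyGetD a y 0 < PySem.List.pyGetD a x 0) ↔ pvK a n y < pvK a n x := by
  unfold pvK
  set u := PySem.List.pyGetD a y 0
  set v := PySem.List.pyGetD a x 0
  constructor
  · intro h
    have h1 : 1 * n ≤ (v - u) * n := mul_le_mul_of_nonneg_right (by omega) (by omega)
    linarith
  · intro h
    by_contra hle
    have h1 : 0 * n ≤ (u - v) * n := mul_le_mul_of_nonneg_right (by omega) (by omega)
    linarith

theorem pv_K_ne (a : List Int) (n x y : Int) (h0 : 0 ≤ y) (hyx : y < x) (hxn : x < n) :
    pvK a n y ≠ pvK a n x := by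
  intro he
  unfold pvK at he
  set u := PySem.List.pyGetD a y 0
  set v := PySem.List.pyGetD a x 0
  rcases lt_trichotomy u v with h | h | h
  · have h1 : 1 * n ≤ (v - u) * n := mul_le_mul_of_nonneg_right (by omega) (by omega)
    linarith
  · rw [h] at he; linarith
  · have h1 : 1 * n ≤ (u - v) * n := mul_le_mul_of_nonneg_right (by omega) (by omega)
    linarith

theorem pv_K_le_iff (a : List Int) (n i j : Int) (hi0 : 0 ≤ i) (hin : i < n) (hj0 : 0 ≤ j) (hjn : j < n) :
    (pvK a n i ≤ pvK a n j) ↔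
      (PySem.List.pyGetD a j 0 > PySem.List.pyGetD a i 0 ∨
        (PySem.List.pyGetD a j 0 = PySem.List.pyGetD a i 0 ∧ j ≤ i)) := by
  unfold pvK
  set u := PySem.List.pyGetD a i 0
  set v := PySem.List.pyGetD a j 0
  constructor
  · intro h
    rcases lt_trichotomy u v with hc | hc | hc
    · exact Or.inl hc
    · refine Or.inr ⟨hc.symm, ?_⟩
      rw [hc] at h; linarith
    · exfalso
      have h1 : 1 * n ≤ (u - v) * n := mul_le_mul_of_nonneg_right (by omega) (by omega)
      linarith
  · rintro (h | ⟨he, hle⟩)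
    · have h1 : 1 * n ≤ (v - u) * n := mul_le_mul_of_nonneg_right (by omega) (by omega)
      linarith
    · rw [he]; linarith

-- inserting with two comparators that agree on the accumulator gives the same list
theorem pv_insertBy_congr {α : Type} (b1 b2 : α → α → Bool) (x : α) (ys : List α)
    (h : ∀ y ∈ ys, b1 x y = b2 x y) :
    PySem.List.insertBy b1 x ys = PySem.List.insertBy b2 x ys := by
  induction ys with
  | nil => rfl
  | cons y ys ih =>
      simp only [PySem.List.insertBy]
      rw [h y (by simp)]
      by_cases hb : b2 x y
      · simp [hb]
      · simp [hb, ih (fun z hz => h z (by simp [hz]))]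

-- insertion sorts with comparators agreeing on "earlier vs later" pairs coincide on an increasing list
theorem pv_foldl_insertBy_congr (n : Int) (b1 b2 : Int → Int → Bool)
    (h : ∀ x y : Int, 0 ≤ y → y < x → x < n → b1 x y = b2 x y) :
    ∀ (xs acc : List Int), xs.Pairwise (· < ·) → (∀ x ∈ xs, 0 ≤ x ∧ x < n) →
      (∀ y ∈ acc, 0 ≤ y ∧ ∀ x ∈ xs, y < x) →
      xs.foldl (fun acc x => PySem.List.insertBy b1 x acc) acc
        = xs.foldl (fun acc x => PySem.List.insertBy b2 x acc) acc := by
  intro xs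
  induction xs with
  | nil => intro acc _ _ _; rfl
  | cons x xs ih =>
      intro acc hpw hbnd hacc
      simp only [List.foldl_cons]
      have hstep : PySem.List.insertBy b1 x acc = PySem.List.insertBy b2 x acc := by
        apply pv_insertBy_congr
        intro y hy
        exact h x y (hacc y hy).1 ((hacc y hy).2 x (by simp)) (hbnd x (by simp)).2
      rw [hstep]
      apply ih
      · exact hpw.of_cons
      · exact fun z hz => hbnd z (by simp [hz])
      · intro y hy
        rw [PySem.List.mem_insertBy] at hy
        rcases hy with rfl | hy
        · exact ⟨(hbnd y (by simp)).1, fun z hz => (List.pairwise_cons.mp hpw).1 z hz⟩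
        · exact ⟨(hacc y hy).1, fun z hz => (hacc y hy).2 z (by simp [hz])⟩

-- prefix sums of xs: entry j is sum of xs[0..j]
def pvPref (xs : List Int) : List Int :=
  (List.range xs.length).map (fun j => ((xs.take (j + 1)).sum))

def pvMix (xs : List Int) (k : Nat) : List Int := pvPref (xs.take k) ++ xs.drop k

theorem pv_pref_take (xs : List Int) (m : Nat) (hm : m ≤ xs.length) :
    pvPref (xs.take m) = (List.range m).map (fun j => (xs.take (j + 1)).sum) := by
  unfold pvPref
  rw [List.length_take, Nat.min_eq_left hm]
  apply List.map_congr_left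
  intro j hj
  rw [List.mem_range] at hj
  rw [List.take_take, Nat.min_eq_left (by omega)]

theorem pv_mix_step (xs : List Int) (k : Nat) (h1 : 1 ≤ k) (h2 : k < xs.length) :
    PySem.List.pySetD (pvMix xs k) (k : Int)
      (PySem.List.pyGetD (pvMix xs k) (k : Int) 0 + PySem.List.pyGetD (pvMix xs k) ((k : Int) - 1) 0)
      = pvMix xs (k + 1) := by
  have hk1 : (k : Int) - 1 = ((k - 1 : Nat) : Int) := by omega
  have hlen1 : (pvPref (xs.take k)).length = k := by
    simp [pvPref, List.length_take]; omega
  have hdrop : xs.drop k = xs[k] :: xs.drop (k + 1) := List.drop_eq_getElem_cons h2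
  have hget1 : PySem.List.pyGetD (pvMix xs k) (k : Int) 0 = xs[k] := by
    rw [PySem.List.pyGetD_natCast]
    unfold pvMix
    rw [List.getD_append_right _ _ _ _ (by omega), hlen1, Nat.sub_self, hdrop]
    rfl
  have hget2 : PySem.List.pyGetD (pvMix xs k) ((k : Int) - 1) 0 = (xs.take k).sum := by
    rw [hk1, PySem.List.pyGetD_natCast]
    unfold pvMix
    rw [List.getD_append _ _ _ _ (by omega)]
    rw [pv_pref_take xs k (le_of_lt h2)]
    rw [List.getD_eq_getElem _ _ (by simp; omega)]
    simp only [List.getElem_map, List.getElem_range]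
    have hkk : k - 1 + 1 = k := by omega
    rw [hkk]
  rw [hget1, hget2]
  rw [PySem.List.pySetD_natCast]
  have hsum : xs[k] + (xs.take k).sum = (xs.take (k + 1)).sum := by
    rw [List.take_add_one, List.sum_append]
    rw [List.getElem?_eq_getElem h2]
    simp [add_comm]
  rw [hsum]
  unfold pvMix
  rw [hdrop, List.set_append_right _ _ (by omega), hlen1, Nat.sub_self]
  have hprefsucc : pvPref (xs.take (k + 1))
      = pvPref (xs.take k) ++ [(xs.take (k + 1)).sum] := by
    rw [pv_pref_take xs (k + 1) (by omega), pv_pref_take xs k (le_of_lt h2)]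
    rw [List.range_succ, List.map_append]
    rfl
  rw [hprefsucc]
  simp [List.set]

theorem pv_fold_pref_aux (xs : List Int) (d k : Nat) (h1 : 1 ≤ k) (h2 : k + d = xs.length) :
    (PySem.List.pyRange (k : Int) (xs.length : Int) 1).foldl
      (fun rs i => PySem.List.pySetD rs i (PySem.List.pyGetD rs i 0 + PySem.List.pyGetD rs (i - 1) 0))
      (pvMix xs k) = pvMix xs xs.length := by
  induction d generalizing k with
  | zero =>
      rw [PySem.List.pyRange_one_eq_nil (by omega)]
      simp only [List.foldl_nil]
      have : k = xs.length := by omega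
      rw [this]
  | succ d ih =>
      rw [PySem.List.pyRange_one_cons (by omega : (k : Int) < (xs.length : Int))]
      simp only [List.foldl_cons]
      rw [pv_mix_step xs k h1 (by omega)]
      have hcast : (k : Int) + 1 = ((k + 1 : Nat) : Int) := by omega
      rw [hcast]
      exact ih (k + 1) (by omega) (by omega)

theorem pv_fold_pref (xs : List Int) :
    (PySem.List.pyRange 1 (xs.length : Int) 1).foldl
      (fun rs i => PySem.List.pySetD rs i (PySem.List.pyGetD rs i 0 + PySem.List.pyGetD rs (i - 1) 0))
      xs = pvPref xs := by
  cases xs with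
  | nil =>
      rw [PySem.List.pyRange_one_eq_nil (by simp)]
      simp [pvPref]
  | cons x t =>
      have hmix1 : pvMix (x :: t) 1 = x :: t := by
        simp [pvMix, pvPref]
      have hmixn : pvMix (x :: t) (x :: t).length = pvPref (x :: t) := by
        simp [pvMix, List.take_of_length_le (le_refl _), List.drop_of_length_le (le_refl _)]
      have := pv_fold_pref_aux (x :: t) t.length 1 (le_refl _) (by rw [List.length_cons]; omega)
      rw [hmix1, hmixn] at this
      exact_mod_cast this

-- the (k+1)-prefix of a strictly K-descending permutation of a nodup list R
-- is a permutation of the filter "K-at-least the k-th element"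
theorem pv_take_perm_filter (K : Int → Int) (I R : List Int)
    (hperm : I.Perm R) (hR : R.Nodup)
    (hpair : I.Pairwise (fun p q => K q < K p)) (k : Nat) (hk : k < I.length) :
    (I.take (k + 1)).Perm (R.filter (fun j => decide (K (I[k]'hk) ≤ K j))) := by
  have hInodup : I.Nodup := (hperm.nodup_iff).mpr hR
  have hpw := List.pairwise_iff_getElem.mp hpair
  rw [List.perm_ext_iff_of_nodup (hInodup.sublist (List.take_sublist _ _)) (hR.filter _)]
  intro j
  rw [List.mem_filter, decide_eq_true_eq, ← hperm.mem_iff]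
  constructor
  · intro hj
    obtain ⟨m, hm, hjm⟩ := List.getElem_of_mem hj
    have hmI : m < I.length := by
      have h := hm; rw [List.length_take] at h; omega
    have hmk : m < k + 1 := by
      have h := hm; rw [List.length_take] at h; omega
    rw [List.getElem_take] at hjm
    refine ⟨hjm ▸ List.getElem_mem hmI, ?_⟩
    rcases Nat.lt_or_ge m k with hlt | hge
    · exact le_of_lt (hjm ▸ hpw m k hmI hk hlt)
    · have hmeq : m = k := by omega
      subst hmeq
      exact le_of_eq (by rw [hjm])
  · rintro ⟨hj, hK⟩
    obtain ⟨m, hm, hjm⟩ := List.getElem_of_mem hj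
    have hmk : m < k + 1 := by
      by_contra hge
      have hge' : k + 1 ≤ m := Nat.le_of_not_lt hge
      have := hpw k m hk hm (by omega)
      rw [hjm] at this
      omega
    have hlt : m < (I.take (k + 1)).length := by
      rw [List.length_take]; omega
    have hval : (I.take (k + 1))[m]'hlt = j := by
      rw [List.getElem_take]; exact hjm
    exact hval ▸ List.getElem_mem hlt

-- an index-driven running max equals the fold over the list itself
theorem pv_fold_index (l : List Int) (g : Int → Int) (init : Int) :
    (List.range l.length).foldl (fun m k => max m (g (l.getD k 0))) init
      = l.foldl (fun m x => max m (g x)) init := by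
  have hl : (List.range l.length).map (fun k => l.getD k 0) = l := by
    apply List.ext_getElem
    · simp
    · intro i h1 h2
      simp [List.getD_eq_getElem?_getD, List.getElem?_eq_getElem h2]
  conv_rhs => rw [← hl]
  rw [List.foldl_map]

-- ===== VERDICT (by name: the statement is the Claim_ definition above) =====
theorem getMaxStabilityGreedy_spec : Claim_equal_getMaxStabilityGreedy := by
  intro r a _ hpre
  unfold Spec_getMaxStabilityGreedy getMaxStabilityGreedy getMaxStabilityGreedy_alt
  simp only []
  have hpre' : r.length ≤ a.length := hpre
  set n : Int := (r.length : Int) with hn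
  set K : Int → Int := pvK a n with hK
  set R : List Int := PySem.List.pyRange 0 n 1 with hRdef
  have hmemR : ∀ x ∈ R, 0 ≤ x ∧ x < n := by
    intro x hx
    rw [hRdef, PySem.List.mem_pyRange_one] at hx
    exact hx
  have hRnodup : R.Nodup := by
    rw [hRdef, PySem.List.pyRange_one]
    exact (List.nodup_range).map (fun k1 k2 h => by omega)
  have hpairR : R.Pairwise (· < ·) := by
    rw [hRdef, PySem.List.pyRange_one, List.pairwise_map]
    refine (List.pairwise_lt_range).imp ?_
    intro i j hij
    omega
  have hlenR : R.length = r.length := by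
    rw [hRdef, PySem.List.length_pyRange_one]; omega
  have hcmp : ∀ x y : Int, 0 ≤ y → y < x → x < n →
      (decide (PySem.List.pyGetD a y 0 < PySem.List.pyGetD a x 0) : Bool)
        = decide (K y < K x) := by
    intro x y h0 hyx hxn
    exact decide_eq_decide.mpr (pv_K_lt_iff a n x y h0 hyx hxn)
  have hswitch : PySem.List.sorted R (fun x => PySem.List.pyGetD a x 0) true
      = PySem.List.sorted R K true := by
    rw [PySem.List.sorted_rev_eq_foldl_insertBy, PySem.List.sorted_rev_eq_foldl_insertBy]
    exact pv_foldl_insertBy_congr n _ _ hcmp R [] hpairR hmemR (by simp)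
  rw [hswitch]
  set I : List Int := PySem.List.sorted R K true with hI
  have hperm : I.Perm R := PySem.List.sorted_perm R K true
  have hInodup : I.Nodup := (List.Perm.nodup_iff hperm).mpr hRnodup
  have hmemI : ∀ x ∈ I, 0 ≤ x ∧ x < n := fun x hx => hmemR x (hperm.subset hx)
  have hpairI : I.Pairwise (fun p q => K q < K p) := by
    refine List.Pairwise.imp_of_mem ?_ ((PySem.List.sorted_pairwise_rev R K).and hInodup)
    intro p q hp hq hpq
    obtain ⟨hle, hne⟩ := hpq
    rcases lt_or_gt_of_ne hne with hlt | hgt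
    · exact lt_of_le_of_ne hle (Ne.symm (pv_K_ne a n q p (hmemI p hp).1 hlt (hmemI q hq).2))
    · exact lt_of_le_of_ne hle (pv_K_ne a n p q (hmemI q hq).1 hgt (hmemI p hp).2)
  have hlenI : I.length = r.length := by
    rw [hI, PySem.List.length_sorted]; exact hlenR
  set rg : Int → Int := fun i => PySem.List.pyGetD r i 0 with hrg
  set Ssum : Int → Int := fun i => ((R.filter (fun j => decide (K i ≤ K j))).map rg).sum with hS
  set g : Int → Int := fun i => PySem.List.pyGetD a i 0 * Ssum i with hg
  -- the prefix-sum loop of A computes pvPref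
  have hlenmap : ((I.map rg).length : Int) = n := by
    rw [List.length_map, hlenI, hn]
  have hps : (PySem.List.pyRange 1 n 1).foldl
      (fun rs i => PySem.List.pySetD rs i (PySem.List.pyGetD rs i 0 + PySem.List.pyGetD rs (i - 1) 0))
      (I.map rg) = pvPref (I.map rg) := by
    rw [← hlenmap]
    exact pv_fold_pref (I.map rg)
  rw [hps]
  have hprefval : ∀ (k : Nat) (hk : k < I.length),
      PySem.List.pyGetD (pvPref (I.map rg)) (k : Int) 0 = Ssum (I[k]'hk) := by
    intro k hk
    rw [PySem.List.pyGetD_natCast]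
    unfold pvPref
    rw [List.getD_eq_getElem _ _ (by simp [hk])]
    simp only [List.getElem_map, List.getElem_range]
    rw [← List.map_take]
    have hpf := pv_take_perm_filter K I R hperm hRnodup hpairI k hk
    exact (List.Perm.map rg hpf).sum_eq
  congr 1
  -- A's max loop equals the canonical running max of g over R
  have hnn : (n - 0).toNat = I.length := by rw [hlenI]; omega
  conv_lhs => rw [hRdef, PySem.List.pyRange_one, hnn, List.foldl_map]
  have hstep : ∀ (m : Int), ∀ k ∈ List.range I.length,
      max m (PySem.List.pyGetD a (PySem.List.pyGetD I ((0 : Int) + (k : Int)) 0) 0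
        * PySem.List.pyGetD (pvPref (I.map rg)) ((0 : Int) + (k : Int)) 0)
      = max m (g (I.getD k 0)) := by
    intro m k hk
    rw [List.mem_range] at hk
    have h0 : (0 : Int) + (k : Int) = (k : Int) := by ring
    rw [h0, PySem.List.pyGetD_natCast, hprefval k hk, List.getD_eq_getElem _ _ hk]
  rw [PySem.List.foldl_congr_mem _ _ _ _ hstep]
  rw [pv_fold_index I g 0]
  haveI : RightCommutative (fun (m x : Int) => max m (g x)) :=
    ⟨fun b a1 a2 => max_right_comm b (g a1) (g a2)⟩
  rw [hperm.foldl_eq 0]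
  -- B's nested scan equals the same canonical running max of g over R
  have hB : ∀ i ∈ R,
      R.foldl (fun s j =>
        if PySem.List.pyGetD a j 0 > PySem.List.pyGetD a i 0
            ∨ (PySem.List.pyGetD a j 0 = PySem.List.pyGetD a i 0 ∧ j ≤ i)
        then s + PySem.List.pyGetD r j 0 else s) 0 = Ssum i := by
    intro i hi
    rw [PySem.List.foldl_ite_eq_foldl_filter
      (p := fun j => PySem.List.pyGetD a j 0 > PySem.List.pyGetD a i 0
        ∨ (PySem.List.pyGetD a j 0 = PySem.List.pyGetD a i 0 ∧ j ≤ i))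
      (f := fun s j => s + PySem.List.pyGetD r j 0)]
    have hfc : R.filter (fun j => decide (PySem.List.pyGetD a j 0 > PySem.List.pyGetD a i 0
        ∨ (PySem.List.pyGetD a j 0 = PySem.List.pyGetD a i 0 ∧ j ≤ i)))
        = R.filter (fun j => decide (K i ≤ K j)) := by
      apply List.filter_congr
      intro j hj
      apply decide_eq_decide.mpr
      exact (pv_K_le_iff a n i j (hmemR i hi).1 (hmemR i hi).2 (hmemR j hj).1 (hmemR j hj).2).symm
    rw [hfc, PySem.List.foldl_add, zero_add]
  have hstepB : ∀ (m : Int), ∀ i ∈ R,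
      max m (PySem.List.pyGetD a i 0 *
        R.foldl (fun s j =>
          if PySem.List.pyGetD a j 0 > PySem.List.pyGetD a i 0
              ∨ (PySem.List.pyGetD a j 0 = PySem.List.pyGetD a i 0 ∧ j ≤ i)
          then s + PySem.List.pyGetD r j 0 else s) 0)
      = max m (g i) := by
    intro m i hi
    rw [hB i hi]
  rw [PySem.List.foldl_congr_mem _ _ _ _ hstepB]
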